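-- pv_equiv track=rewrite | github.com/ienglishkorea-beep/- | emr6_main.py | summarize_holdings_sources
-- ===== SOURCE A (Python) =====
-- from typing import Dict, List, Optional, Tuple
--
-- def summarize_holdings_sources(source_map: Dict[str, str]) -> str:
--     counts = {"cache": 0, "csv": 0, "yfinance": 0, "none": 0}
--     for v in source_map.values():
--         counts[v] = counts.get(v, 0) + 1
--
--     parts = []
--     for key in ["cache", "csv", "yfinance", "none"]:
--         if counts.get(key, 0) > 0:
--             parts.append(f"{key} {counts[key]}")
--     return " / ".join(parts) if parts else "-"
-- ===== SOURCE B (Python) =====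
-- def summarize_holdings_sources(source_map):
--     def go(keys, vals):
--         if not keys:
--             return []
--         k, rest_keys = keys[0], keys[1:]
--         remaining = [v for v in vals if v != k]
--         n = len(vals) - len(remaining)
--         part = [f"{k} {n}"] if n > 0 else []
--         return part + go(rest_keys, remaining)
--     parts = go(["cache", "csv", "yfinance", "none"], list(source_map.values()))
--     return " / ".join(parts) if parts else "-"
-- ===== Notes on version B (the rewrite author's own statement) =====
-- stated objective: alternative
-- what changed: Replaces A's mutable frequency dict plus a second formatting loop with a single recursion over the fixed key list that partitions the value list: each step removes the current key's occurrences and reads its count off the length difference, so no counting container exists at all.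
import Mathlib
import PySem

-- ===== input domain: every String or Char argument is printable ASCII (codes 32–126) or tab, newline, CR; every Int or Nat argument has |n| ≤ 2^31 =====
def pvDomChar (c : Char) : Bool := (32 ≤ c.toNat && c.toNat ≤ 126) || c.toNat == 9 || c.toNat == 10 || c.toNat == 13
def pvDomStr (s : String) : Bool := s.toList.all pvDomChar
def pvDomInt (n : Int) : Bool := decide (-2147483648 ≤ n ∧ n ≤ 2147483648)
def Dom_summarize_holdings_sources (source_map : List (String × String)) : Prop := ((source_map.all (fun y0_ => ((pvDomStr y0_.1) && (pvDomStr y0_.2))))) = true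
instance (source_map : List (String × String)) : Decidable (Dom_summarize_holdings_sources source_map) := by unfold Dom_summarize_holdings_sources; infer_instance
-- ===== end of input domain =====

-- B replaces A's mutable frequency table and second formatting loop with one recursion over
-- the fixed key list that partitions the value list: each step removes the current key's
-- occurrences and reads its count off the length difference (objective: alternative).
-- The association list is a Python dict: both ports read its values through PySem.Dict.ofList.

-- ===== PORT A =====
def summarize_holdings_sources (source_map : List (String × String)) : String :=
  let counts0 : PySem.Dict String Int :=
    PySem.Dict.ofList [("cache", 0), ("csv", 0), ("yfinance", 0), ("none", 0)]
  let counts := ((PySem.Dict.ofList source_map).values).foldl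
    (fun d v => d.insert v (d.getD v 0 + 1)) counts0
  let parts := ["cache", "csv", "yfinance", "none"].foldl
    (fun parts key =>
      if counts.getD key 0 > 0 then
        parts ++ [key ++ " " ++ PySem.Int.toStr (counts.getD key 0)]
      else parts) []
  if parts ≠ [] then PySem.Str.join " / " parts else "-"

-- ===== PORT B =====
-- go keys vals: B's inner recursion, transcribed step for step
def pvGo_summarize : List String → List String → List String
  | [], _ => []
  | k :: rest_keys, vals =>
    let remaining := vals.filter (fun v => v ≠ k)
    let n : Int := (vals.length : Int) - (remaining.length : Int)
    (if n > 0 then [k ++ " " ++ PySem.Int.toStr n] else []) ++ pvGo_summarize rest_keys remaining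

def summarize_holdings_sources_alt (source_map : List (String × String)) : String :=
  let parts := pvGo_summarize ["cache", "csv", "yfinance", "none"]
    ((PySem.Dict.ofList source_map).values)
  if parts ≠ [] then PySem.Str.join " / " parts else "-"

-- ===== PRECONDITION & SPEC =====
def Spec_summarize_holdings_sources (source_map : List (String × String)) (out : String) : Prop := out = summarize_holdings_sources_alt source_map
instance (source_map : List (String × String)) (out : String) : Decidable (Spec_summarize_holdings_sources source_map out) := by unfold Spec_summarize_holdings_sources; infer_instance

-- ===== CLAIM (what is proved, stated in full; the proofs are below) =====
def Claim_equal_summarize_holdings_sources : Prop := ∀ (source_map : List (String × String)), Dom_summarize_holdings_sources source_map → Spec_summarize_holdings_sources source_map (summarize_holdings_sources source_map)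

-- ===== LEMMAS AND PROOFS =====

-- the length difference of one partition step is exactly the removed key's count
theorem pv_len_sub_filter (vals : List String) (k : String) :
    ((vals.length : Int) - ((vals.filter (fun v => v ≠ k)).length : Int)) = (vals.count k : Int) := by
  simp only [ne_eq, decide_not]
  induction vals with
  | nil => simp
  | cons x xs ih =>
    by_cases h : x = k <;>
      simp only [List.filter_cons, List.count_cons, h, decide_true, decide_false, Bool.not_true,
        Bool.not_false, Bool.false_eq_true, if_false, if_true, List.length_cons, beq_self_eq_true,
        beq_iff_eq] <;> push_cast <;> omega

-- filtering out one key leaves the counts of the other keys unchanged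
theorem pv_count_filter_ne (vals : List String) (k k' : String) (h : k' ≠ k) :
    (vals.filter (fun v => v ≠ k)).count k' = vals.count k' := by
  simp only [ne_eq, decide_not]
  induction vals with
  | nil => rfl
  | cons x xs ih =>
    by_cases hx : x = k
    · subst hx
      simp only [List.filter_cons, decide_true, Bool.not_true, Bool.false_eq_true, if_false,
        List.count_cons, ih, beq_iff_eq]
      have : ¬ x = k' := fun e => h e.symm
      simp [this]
    · simp [List.count_cons, hx, ih]

-- ===== VERDICT (by name: the statement is the Claim_ definition above) =====
theorem summarize_holdings_sources_spec : Claim_equal_summarize_holdings_sources := by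
  intro source_map _
  unfold Spec_summarize_holdings_sources summarize_holdings_sources summarize_holdings_sources_alt
  simp only [PySem.Dict.getD_foldl_insert_add_one]
  generalize (PySem.Dict.ofList source_map).values = vals
  have h1 : (PySem.Dict.ofList [("cache", (0:Int)), ("csv", 0), ("yfinance", 0), ("none", 0)]).getD "cache" 0 = 0 := rfl
  have h2 : (PySem.Dict.ofList [("cache", (0:Int)), ("csv", 0), ("yfinance", 0), ("none", 0)]).getD "csv" 0 = 0 := rfl
  have h3 : (PySem.Dict.ofList [("cache", (0:Int)), ("csv", 0), ("yfinance", 0), ("none", 0)]).getD "yfinance" 0 = 0 := rfl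
  have h4 : (PySem.Dict.ofList [("cache", (0:Int)), ("csv", 0), ("yfinance", 0), ("none", 0)]).getD "none" 0 = 0 := rfl
  have c2 : (vals.filter (fun v => v ≠ "cache")).count "csv" = vals.count "csv" :=
    pv_count_filter_ne _ _ _ (by decide)
  have c3 : ((vals.filter (fun v => v ≠ "cache")).filter (fun v => v ≠ "csv")).count "yfinance"
      = vals.count "yfinance" := by
    rw [pv_count_filter_ne _ _ _ (by decide), pv_count_filter_ne _ _ _ (by decide)]
  have c4 : (((vals.filter (fun v => v ≠ "cache")).filter (fun v => v ≠ "csv")).filter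
      (fun v => v ≠ "yfinance")).count "none" = vals.count "none" := by
    rw [pv_count_filter_ne _ _ _ (by decide), pv_count_filter_ne _ _ _ (by decide),
      pv_count_filter_ne _ _ _ (by decide)]
  simp only [pvGo_summarize, pv_len_sub_filter, c2, c3, c4, h1, h2, h3, h4,
    List.foldl_cons, List.foldl_nil, zero_add]
  generalize (vals.count "cache" : Int) = n1
  generalize (vals.count "csv" : Int) = n2
  generalize (vals.count "yfinance" : Int) = n3
  generalize (vals.count "none" : Int) = n4
  split_ifs <;> simp_all
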